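-- pv_equiv track=rewrite | github.com/MEERAN2314/pynta | unifyt/formatter.py | _unit_to_html
-- ===== SOURCE A (Python) =====
-- def _unit_to_html(unit_str: str) -> str:
--     """Convert unit string to HTML."""
--     # Handle division
--     if '/' in unit_str:
--         parts = unit_str.split('/')
--         numerator = parts[0].strip()
--         denominator = parts[1].strip()
--         return f"{numerator}/{denominator}"
--
--     # Handle powers
--     result = unit_str
--     i = 0
--     while i < len(result):
--         if result[i] == '^':
--             # Find the number after ^
--             j = i + 1
--             while j < len(result) and (result[j].isdigit() or result[j] in '-+'):
--                 j += 1
--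
--             power = result[i+1:j]
--             result = result[:i] + f"<sup>{power}</sup>" + result[j:]
--             i = i + len(f"<sup>{power}</sup>")
--         else:
--             i += 1
--
--     return result
-- ===== SOURCE B (Python) =====
-- def _unit_to_html(unit_str: str) -> str:
--     """Convert unit string to HTML."""
--     # Handle division (first two '/'-parts only, as specified)
--     if '/' in unit_str:
--         parts = unit_str.split('/')
--         return f"{parts[0].strip()}/{parts[1].strip()}"
--
--     # Handle powers: repeatedly chop at the first '^', wrap the sign/digit
--     # run that follows it in <sup>…</sup>, and continue on the remainder.
--     pieces = []
--     s = unit_str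
--     while True:
--         k = s.find('^')
--         if k == -1:
--             pieces.append(s)
--             return ''.join(pieces)
--         head, tail = s[:k], s[k + 1:]
--         rest = tail.lstrip('0123456789+-')
--         power = tail[:len(tail) - len(rest)]
--         pieces.append(f"{head}<sup>{power}</sup>")
--         s = rest
-- ===== Notes on version B (the rewrite author's own statement) =====
-- stated objective: alternative
-- what changed: A repeatedly splices <sup> markup into the working string in place and skips its index past the insertion; B never rewrites the string: it chops at each '^' (str.find), wraps the following sign/digit run taken via lstrip, collects the pieces in a list and joins them once.
import Mathlib
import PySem

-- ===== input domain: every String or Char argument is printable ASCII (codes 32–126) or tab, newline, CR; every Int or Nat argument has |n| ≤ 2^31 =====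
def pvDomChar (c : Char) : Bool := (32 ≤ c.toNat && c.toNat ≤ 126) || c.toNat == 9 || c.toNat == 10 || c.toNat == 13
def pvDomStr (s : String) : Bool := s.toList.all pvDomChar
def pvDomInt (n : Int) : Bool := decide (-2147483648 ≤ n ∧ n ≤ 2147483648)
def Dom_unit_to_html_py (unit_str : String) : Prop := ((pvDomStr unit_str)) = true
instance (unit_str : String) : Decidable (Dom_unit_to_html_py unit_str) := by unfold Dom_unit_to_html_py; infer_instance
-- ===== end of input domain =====

-- ===== PORT A =====
-- B replaces A's in-place string splicing (rebuild `result` and skip the index past the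
-- inserted markup) by chopping the string at each '^' and emitting pieces; alternative
-- decomposition, return value only (no side effects in either).

-- Python: result[j].isdigit() or result[j] in '-+'
def aPow (c : Char) : Bool := PySem.Chars.isdigit c || c == '-' || c == '+'

-- Python: inner `while j < len(result) and (...)`: advance j past the digit/sign run
def aScan (res : List Char) (j : Nat) : Nat :=
  if h : j < res.length then
    if aPow res[j] then aScan res (j + 1) else j
  else j
  termination_by res.length - j
  decreasing_by omega

-- aScan never moves backwards (used by aLoop's termination proof)
theorem aScan_ge (res : List Char) (j : Nat) : j ≤ aScan res j := by
  fun_induction aScan with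
  | case1 => omega
  | case2 => omega
  | case3 => omega

-- measure fact for aLoop's termination proof (stated with the inserted list abstract,
-- so the proof term stays small)
theorem aLoop_dec (res ins : List Char) (i j : Nat) (h : i < res.length) (h1 : i + 1 ≤ j) :
    (List.take i res ++ ins ++ List.drop j res).length - (i + ins.length) < res.length - i := by
  rw [List.length_append, List.length_append, List.length_drop,
    List.length_take_of_le (Nat.le_of_lt h)]
  omega

-- Python: outer `while i < len(result)` with in-place replacement result[:i] + sup + result[j:]
def aLoop (res : List Char) (i : Nat) : List Char :=
  if h : i < res.length then
    if res[i] == '^' then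
      let j := aScan res (i + 1)
      -- power = result[i+1:j]; both bounds are Nats here, so the slice is take/drop (slice_natCast)
      let power := PySem.List.slice res (some ((i + 1 : Nat) : Int)) (some ((j : Nat) : Int))
      let ins := "<sup>".toList ++ power ++ "</sup>".toList
      aLoop (PySem.List.slice res none (some ((i : Nat) : Int)) ++ ins
             ++ PySem.List.slice res (some ((j : Nat) : Int)) none) (i + ins.length)
    else aLoop res (i + 1)
  else res
  termination_by res.length - i
  decreasing_by
  · have h1 : i + 1 ≤ aScan res (i + 1) := aScan_ge res (i + 1)
    rw [PySem.List.slice_to res (b := ((i : Nat) : Int)) (Int.natCast_nonneg i),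
      PySem.List.slice_from res (a := ((aScan res (i + 1) : Nat) : Int))
        (Int.natCast_nonneg _), Int.toNat_natCast, Int.toNat_natCast]
    exact aLoop_dec res _ i (aScan res (i + 1)) h h1
  · omega

def unit_to_html_py (unit_str : String) : String :=
  if PySem.Str.isIn "/" unit_str then
    -- '/' occurs in unit_str, so split yields at least two parts: parts[0]/parts[1] never raise
    let parts := PySem.Chars.splitOn unit_str.toList ['/']
    let numerator := PySem.Chars.strip (parts.getD 0 [])
    let denominator := PySem.Chars.strip (parts.getD 1 [])
    String.ofList (numerator ++ ['/'] ++ denominator)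
  else
    String.ofList (aLoop unit_str.toList 0)

-- ===== PORT B =====
-- Python: tail.lstrip('0123456789+-') — strip the leading run of these chars (exact for lstrip with a chars argument)
def bStrip (tail : List Char) : List Char := tail.dropWhile (fun c => "0123456789+-".toList.contains c)

-- measure fact for bLoop's termination proof (predicate and cut point abstract)
theorem bLoop_dec (p : Char → Bool) (s : List Char) (m : Nat) (hm : 1 ≤ m)
    (hs : 0 < s.length) : (List.dropWhile p (List.drop m s)).length < s.length := by
  have h1 := List.length_dropWhile_le (p := p) (l := List.drop m s)
  rw [List.length_drop] at h1
  omega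

-- when find reports a hit, the hit index is inside the string (used by bLoop's termination proof)
theorem bFindLt {s : List Char} (hk : ¬ PySem.Chars.find s ['^'] = -1) :
    (PySem.Chars.find s ['^']).toNat < s.length := by
  have h0 : 0 ≤ PySem.Chars.find s ['^'] := by
    have := PySem.Chars.neg_one_le_find s ['^']; omega
  have hp := (PySem.Chars.find_spec (s := s) (sub := ['^']) h0).1
  have := hp.length_le
  simp only [List.length_cons, List.length_nil, List.length_drop] at this
  omega

-- Python: the `while True` loop: find the first '^', emit head + <sup>run</sup>, recurse on the rest
def bLoop (s : List Char) (pieces : List (List Char)) : List Char :=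
  let k := PySem.Chars.find s ['^']
  if hk : k = -1 then PySem.Chars.join [] (pieces ++ [s])
  else
    -- head, tail = s[:k], s[k+1:]  (k ≥ 0 here: find returned an index)
    let head := PySem.List.slice s none (some k)
    let tail := PySem.List.slice s (some (k + 1)) none
    let rest := bStrip tail
    let power := tail.take (tail.length - rest.length)
    bLoop rest (pieces ++ [head ++ "<sup>".toList ++ power ++ "</sup>".toList])
  termination_by s.length
  decreasing_by
    have h1 := bFindLt (s := s) hk
    have h0 : 0 ≤ PySem.Chars.find s ['^'] := by
      have := PySem.Chars.neg_one_le_find s ['^']; omega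
    rw [PySem.List.slice_from s (by omega)]
    exact bLoop_dec _ s _ (by omega) (by omega)

def unit_to_html_py_alt (unit_str : String) : String :=
  if PySem.Str.isIn "/" unit_str then
    let parts := PySem.Chars.splitOn unit_str.toList ['/']
    String.ofList (PySem.Chars.strip (parts.getD 0 []) ++ ['/'] ++ PySem.Chars.strip (parts.getD 1 []))
  else
    String.ofList (bLoop unit_str.toList [])

-- ===== PRECONDITION & SPEC =====
def Spec_unit_to_html_py (unit_str : String) (out : String) : Prop := out = unit_to_html_py_alt unit_str
instance (unit_str : String) (out : String) : Decidable (Spec_unit_to_html_py unit_str out) := by unfold Spec_unit_to_html_py; infer_instance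

-- ===== CLAIM (what is proved, stated in full; the proofs are below) =====
def Claim_equal_unit_to_html_py : Prop := ∀ (unit_str : String), Dom_unit_to_html_py unit_str → Spec_unit_to_html_py unit_str (unit_to_html_py unit_str)

-- ===== LEMMAS AND PROOFS =====

-- the common single-pass meaning of both power handlers (proof-only helper)
def fOne (l : List Char) : List Char :=
  match l with
  | [] => []
  | c :: rest =>
    if c = '^' then
      "<sup>".toList ++ rest.takeWhile aPow ++ "</sup>".toList ++ fOne (rest.dropWhile aPow)
    else c :: fOne rest
  termination_by l.length
  decreasing_by
  · have := List.length_dropWhile_le (p := aPow) (l := rest); simp only [List.length_cons]; omega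
  · simp

-- B's strip set is exactly A's character test
theorem charPred_eq (c : Char) : ("0123456789+-".toList.contains c) = aPow c := by
  show ((['0','1','2','3','4','5','6','7','8','9','+','-'] : List Char).contains c) = _
  rw [Bool.eq_iff_iff]
  simp only [aPow, List.contains_cons, List.contains_nil, Bool.or_false, PySem.Chars.isdigit,
    Bool.or_eq_true, beq_iff_eq, decide_eq_true_eq, Bool.and_eq_true, Char.le_def,
    UInt32.le_iff_toNat_le, Char.ext_iff, ← UInt32.toNat_inj]
  simp only [Char.reduceVal, UInt32.reduceToNat]
  omega

theorem take_len_takeWhile (p : Char → Bool) (l : List Char) :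
    l.take ((l.takeWhile p).length) = l.takeWhile p := by
  induction l with
  | nil => rfl
  | cons c t ih => by_cases h : p c <;> simp [h, ih]

theorem drop_len_takeWhile (p : Char → Bool) (l : List Char) :
    l.drop ((l.takeWhile p).length) = l.dropWhile p := by
  induction l with
  | nil => rfl
  | cons c t ih => by_cases h : p c <;> simp [h, ih]

theorem join_nil_eq_flatten (l : List (List Char)) : PySem.Chars.join [] l = l.flatten := by
  show List.intercalate [] l = l.flatten
  unfold List.intercalate
  induction l with
  | nil => rfl
  | cons a t ih =>
    cases t with
    | nil => simp
    | cons b u =>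
      rw [List.intersperse_cons₂, List.flatten_cons, List.flatten_cons, List.flatten_cons]
      simp [ih]

theorem aScan_eq (res : List Char) (j : Nat) :
    aScan res j = j + ((res.drop j).takeWhile aPow).length := by
  fun_induction aScan with
  | case1 j h hp ih =>
    rw [← List.getElem_cons_drop h, List.takeWhile_cons_of_pos hp]
    simp only [List.length_cons, ih]
    omega
  | case2 j h hp =>
    rw [← List.getElem_cons_drop h, List.takeWhile_cons_of_neg hp]
    simp
  | case3 j h =>
    rw [List.drop_eq_nil_of_le (by omega)]
    simp

theorem fOne_of_not_mem {s : List Char} (h : '^' ∉ s) : fOne s = s := by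
  fun_induction fOne with
  | case1 => rfl
  | case2 rest ih => exact absurd List.mem_cons_self h
  | case3 c rest hc ih =>
    simp only [List.mem_cons, not_or] at h
    rw [ih h.2]

theorem fOne_append {a : List Char} (b : List Char) (h : '^' ∉ a) :
    fOne (a ++ b) = a ++ fOne b := by
  induction a with
  | nil => simp
  | cons c t ih =>
    simp only [List.mem_cons, not_or] at h
    have hc : ¬ c = '^' := fun hcc => h.1 hcc.symm
    rw [List.cons_append, fOne, if_neg hc, ih h.2]
    simp

theorem aLoop_eq (res : List Char) (i : Nat) :
    aLoop res i = res.take i ++ fOne (res.drop i) := by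
  fun_induction aLoop with
  | case1 res i h hc =>
    rename_i j power ins ih
    have hch : res[i] = '^' := by simpa using hc
    have hj : j = aScan res (i + 1) := rfl
    have h1 : i + 1 ≤ j := hj ▸ aScan_ge res (i + 1)
    have hjj : j = (i + 1) + ((res.drop (i + 1)).takeWhile aPow).length := hj ▸ aScan_eq res (i + 1)
    have hsl1 : PySem.List.slice res none (some ((i : Nat) : Int)) = res.take i := by
      rw [PySem.List.slice_to res (by omega)]; norm_num
    have hsl2 : PySem.List.slice res (some ((j : Nat) : Int)) none = res.drop j := by
      rw [PySem.List.slice_from res (by omega)]; norm_num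
    have hpow : power = (res.drop (i + 1)).takeWhile aPow := by
      show PySem.List.slice res (some ((i + 1 : Nat) : Int)) (some ((j : Nat) : Int)) = _
      rw [PySem.List.slice_natCast, hjj]
      simp [take_len_takeWhile]
    have hdropj : res.drop j = (res.drop (i + 1)).dropWhile aPow := by
      rw [hjj, ← List.drop_drop, drop_len_takeWhile]
    have hins : ins = "<sup>".toList ++ power ++ "</sup>".toList := rfl
    have hlt : (res.take i).length = i := by simp [Nat.le_of_lt h]
    rw [hsl1, hsl2] at ih
    rw [hsl1, hsl2, ih]
    have htake : List.take (i + ins.length) (res.take i ++ ins ++ res.drop j)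
        = res.take i ++ ins := by
      rw [List.append_assoc, List.take_append, hlt,
        List.take_of_length_le (by simp [Nat.le_of_lt h]),
        List.take_append]
      simp
    have hdrop : List.drop (i + ins.length) (res.take i ++ ins ++ res.drop j)
        = res.drop j := by
      rw [List.append_assoc, List.drop_append, hlt,
        List.drop_append]
      simp [List.drop_eq_nil_of_le, Nat.le_of_lt h]
    rw [htake, hdrop, ← List.getElem_cons_drop h, hch, fOne, if_pos rfl, hins, hpow, hdropj]
    simp [List.append_assoc]
  | case2 res i h hc ih =>
    have hch : res[i] ≠ '^' := by simpa using hc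
    rw [ih, ← List.getElem_cons_drop h, fOne, if_neg hch]
    rw [List.take_add_one, List.getElem?_eq_getElem h]
    simp only [Option.toList_some, List.append_assoc, List.singleton_append]
  | case3 res i h =>
    rw [List.drop_eq_nil_of_le (by omega), List.take_of_length_le (by omega), fOne,
      List.append_nil]

theorem bLoop_eq (s : List Char) (pieces : List (List Char)) :
    bLoop s pieces = pieces.flatten ++ fOne s := by
  fun_induction bLoop with
  | case1 s pieces k hk =>
    have hnot : '^' ∉ s := by
      have := (PySem.Chars.find_eq_neg_one_iff s ['^']).mp hk
      simpa [List.singleton_infix_iff] using this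
    rw [join_nil_eq_flatten, fOne_of_not_mem hnot]
    simp
  | case2 s pieces =>
    rename_i k hk head tail rest power ih
    have hkdef : k = PySem.Chars.find s ['^'] := rfl
    have h0 : 0 ≤ k := by
      have := PySem.Chars.neg_one_le_find s ['^']; omega
    have hlt : (PySem.Chars.find s ['^']).toNat < s.length := bFindLt (hkdef ▸ hk)
    have hlt' : k.toNat < s.length := hkdef ▸ hlt
    obtain ⟨hpre, hmin⟩ := PySem.Chars.find_spec (s := s) (sub := ['^']) (hkdef ▸ h0)
    obtain ⟨u, hu⟩ := hpre
    have hdropt : s.drop k.toNat = '^' :: s.drop (k.toNat + 1) := by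
      rw [← List.getElem_cons_drop hlt']
      congr 1
      have h1 : s[k.toNat]? = some '^' := by
        rw [← List.head?_drop, hkdef, ← hu]; rfl
      rwa [List.getElem?_eq_getElem hlt', Option.some_inj] at h1
    have hnot : '^' ∉ s.take k.toNat := by
      intro hmem
      obtain ⟨idx, hidx, hgetidx⟩ := List.getElem_of_mem hmem
      have hidx2 : idx < k.toNat := lt_of_lt_of_le hidx (by simp)
      have hidxs : idx < s.length := lt_trans hidx2 hlt'
      refine hmin idx (hkdef ▸ hidx2) ⟨s.drop (idx + 1), ?_⟩
      rw [← List.getElem_cons_drop hidxs, ← hgetidx, List.getElem_take]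
      simp
    have hs : s = s.take k.toNat ++ '^' :: s.drop (k.toNat + 1) := by
      conv_lhs => rw [← List.take_append_drop k.toNat s, hdropt]
    have hhead : head = s.take k.toNat := by
      show PySem.List.slice s none (some k) = _
      rw [PySem.List.slice_to s h0]
    have htail : tail = s.drop (k.toNat + 1) := by
      show PySem.List.slice s (some (k + 1)) none = _
      rw [PySem.List.slice_from s (by omega)]
      congr 1
      omega
    have hfun : (fun c => ("0123456789+-".toList.contains c)) = aPow := funext charPred_eq
    have hrest : rest = tail.dropWhile aPow := by
      show bStrip tail = _
      rw [bStrip, hfun]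
    have hlen : (tail.takeWhile aPow).length + (tail.dropWhile aPow).length = tail.length := by
      have h3 := congrArg List.length (List.takeWhile_append_dropWhile (p := aPow) (l := tail))
      rw [List.length_append] at h3
      exact h3
    have hpow : power = tail.takeWhile aPow := by
      show tail.take (tail.length - rest.length) = _
      rw [hrest]
      have h2 : tail.length - (tail.dropWhile aPow).length = (tail.takeWhile aPow).length := by
        omega
      rw [h2, take_len_takeWhile]
    have hfs : fOne s = s.take k.toNat ++ ("<sup>".toList
        ++ (s.drop (k.toNat + 1)).takeWhile aPow ++ "</sup>".toList
        ++ fOne ((s.drop (k.toNat + 1)).dropWhile aPow)) := by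
      conv_lhs => rw [hs]
      rw [fOne_append _ hnot, fOne, if_pos rfl]
    rw [ih, hfs, hhead, hpow, hrest, htail]
    simp [List.append_assoc]

theorem unit_to_html_py_spec : Claim_equal_unit_to_html_py := by
  unfold Claim_equal_unit_to_html_py Spec_unit_to_html_py
  intro s _
  unfold unit_to_html_py unit_to_html_py_alt
  cases hb : PySem.Str.isIn "/" s
  · simp only [hb, Bool.false_eq_true, if_false]
    rw [aLoop_eq, bLoop_eq]
    simp
  · simp [hb]
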